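-- pv_equiv track=rewrite | github.com/filutek/utils-for-QC | utils/graph_utils.py | fully_connected
-- ===== SOURCE A (Python) =====
-- def fully_connected(NQ, degree = 2):
--     g = []
--     if degree == 2:
--         for i in range(NQ):
--             for j in range(NQ):
--                 if i < j:
--                     g.append([i,j])
--     elif degree == 3:
--         for i in range(NQ):
--             for j in range(NQ):
--                 for k in range(NQ):
--                     if i < j and j < k:
--                         g.append([i,j,k])
--     return g
-- ===== SOURCE B (Python) =====
-- def _combs(lo, NQ, k):
--     # all strictly increasing k-tuples from range(lo, NQ), in lexicographic order
--     if k == 0: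
--         return [[]]
--     out = []
--     for x in range(lo, NQ):
--         for rest in _combs(x + 1, NQ, k - 1):
--             out.append([x] + rest)
--     return out
--
-- def fully_connected(NQ, degree=2):
--     if degree == 2 or degree == 3:
--         return _combs(0, NQ, degree)
--     return []
-- ===== Notes on version B (the rewrite author's own statement) =====
-- stated objective: alternative
-- what changed: Replaces the full NQ^degree cartesian nested loops with i<j(<k) rejection by recursive direct generation of only the increasing tuples over suffix ranges.
import Mathlib
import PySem

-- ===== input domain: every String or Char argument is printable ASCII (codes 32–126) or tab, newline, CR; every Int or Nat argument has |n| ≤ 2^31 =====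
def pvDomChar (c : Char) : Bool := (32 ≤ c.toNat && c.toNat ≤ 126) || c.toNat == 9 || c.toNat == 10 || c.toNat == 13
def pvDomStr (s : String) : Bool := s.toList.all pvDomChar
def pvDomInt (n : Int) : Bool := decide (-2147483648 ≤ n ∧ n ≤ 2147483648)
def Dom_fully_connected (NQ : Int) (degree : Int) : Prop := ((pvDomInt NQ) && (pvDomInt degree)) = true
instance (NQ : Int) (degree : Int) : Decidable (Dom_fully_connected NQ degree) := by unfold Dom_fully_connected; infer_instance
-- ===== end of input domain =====

-- B replaces A's full NQ^degree cartesian scan with i<j(<k) rejection by recursive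
-- direct generation of only the increasing tuples over suffix ranges (objective: alternative; avoids the filtering scan).

-- ===== PORT A =====
def fully_connected (NQ : Int) (degree : Int) : List (List Int) :=
  let g : List (List Int) := []
  if degree = 2 then
    (PySem.List.pyRange 0 NQ 1).foldl (fun g i =>
      (PySem.List.pyRange 0 NQ 1).foldl (fun g j =>
        if i < j then g ++ [[i, j]] else g) g) g
  else if degree = 3 then
    (PySem.List.pyRange 0 NQ 1).foldl (fun g i =>
      (PySem.List.pyRange 0 NQ 1).foldl (fun g j =>
        (PySem.List.pyRange 0 NQ 1).foldl (fun g k =>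
          if i < j ∧ j < k then g ++ [[i, j, k]] else g) g) g) g
  else g

-- ===== PORT B =====
-- helper _combs of Source B: all strictly increasing k-tuples from range(lo, NQ), lex order
def pvCombs (lo : Int) (NQ : Int) (k : Nat) : List (List Int) :=
  match k with
  | 0 => [[]]
  | Nat.succ k' =>
    (PySem.List.pyRange lo NQ 1).foldl (fun out x =>
      (pvCombs (x + 1) NQ k').foldl (fun out rest => out ++ [x :: rest]) out) []

def fully_connected_alt (NQ : Int) (degree : Int) : List (List Int) :=
  if degree = 2 ∨ degree = 3 then pvCombs 0 NQ degree.toNat else []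

-- ===== PRECONDITION & SPEC =====
def Spec_fully_connected (NQ : Int) (degree : Int) (out : List (List Int)) : Prop := out = fully_connected_alt NQ degree
instance (NQ : Int) (degree : Int) (out : List (List Int)) : Decidable (Spec_fully_connected NQ degree out) := by unfold Spec_fully_connected; infer_instance

-- ===== CLAIM (what is proved, stated in full; the proofs are below) =====
def Claim_equal_fully_connected : Prop := ∀ (NQ : Int) (degree : Int), Dom_fully_connected NQ degree → Spec_fully_connected NQ degree (fully_connected NQ degree)

-- ===== LEMMAS AND PROOFS =====

-- filtering a range for values above i is the suffix range
theorem filter_lt_pyRange (i a b : Int) (h : a ≤ i + 1) :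
    (PySem.List.pyRange a b 1).filter (fun x => decide (i < x)) = PySem.List.pyRange (i + 1) b 1 := by
  by_cases hb : b ≤ i + 1
  · rw [PySem.List.pyRange_one_eq_nil hb, List.filter_eq_nil_iff.mpr]
    intro x hx
    have := (PySem.List.mem_pyRange_one.mp hx).2
    simp; omega
  · rw [PySem.List.pyRange_one_append a (i + 1) b h (by omega), List.filter_append]
    have h1 : (PySem.List.pyRange a (i + 1) 1).filter (fun x => decide (i < x)) = [] := by
      rw [List.filter_eq_nil_iff]
      intro x hx
      have := (PySem.List.mem_pyRange_one.mp hx).2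
      simp; omega
    have h2 : (PySem.List.pyRange (i + 1) b 1).filter (fun x => decide (i < x)) = PySem.List.pyRange (i + 1) b 1 := by
      rw [List.filter_eq_self]
      intro x hx
      have := (PySem.List.mem_pyRange_one.mp hx).1
      simp; omega
    rw [h1, h2, List.nil_append]

theorem flatMap_ite_nil {α β : Type} (l : List α) (p : α → Prop) [DecidablePred p] (G : α → List β) :
    l.flatMap (fun x => if p x then G x else []) = (l.filter (fun x => decide (p x))).flatMap G := by
  induction l with
  | nil => simp
  | cons x xs ih =>
    by_cases hp : p x <;> simp [hp, ih]

-- pvCombs in flatMap form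
theorem pvCombs_succ (lo NQ : Int) (k : Nat) :
    pvCombs lo NQ (k + 1)
      = (PySem.List.pyRange lo NQ 1).flatMap (fun x => (pvCombs (x + 1) NQ k).map (fun rest => x :: rest)) := by
  rw [pvCombs]
  simp only [PySem.List.foldl_append_singleton_eq_map]
  rw [PySem.List.foldl_append_eq_flatMap, List.nil_append]

theorem pvCombs_one (lo NQ : Int) :
    pvCombs lo NQ 1 = (PySem.List.pyRange lo NQ 1).map (fun x => [x]) := by
  rw [pvCombs_succ]
  simp only [pvCombs, List.map_cons, List.map_nil]
  induction (PySem.List.pyRange lo NQ 1) with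
  | nil => simp
  | cons a l ih => simp [ih]

-- degree 2: A's double filtered loop is pvCombs 0 NQ 2
theorem deg2_eq (NQ : Int) :
    (PySem.List.pyRange 0 NQ 1).foldl (fun g i =>
      (PySem.List.pyRange 0 NQ 1).foldl (fun g j =>
        if i < j then g ++ [[i, j]] else g) g) ([] : List (List Int))
    = pvCombs 0 NQ 2 := by
  have step : ∀ (i : Int) (g : List (List Int)),
      (PySem.List.pyRange 0 NQ 1).foldl (fun g j => if i < j then g ++ [[i, j]] else g) g
        = g ++ ((PySem.List.pyRange 0 NQ 1).filter (fun j => decide (i < j))).map (fun j => [i, j]) := by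
    intro i g
    exact PySem.List.foldl_append_ite _ _ _ _
  simp only [step]
  rw [PySem.List.foldl_append_eq_flatMap, List.nil_append, pvCombs_succ]
  apply List.flatMap_congr
  intro i hi
  have h0 : (0 : Int) ≤ i := (PySem.List.mem_pyRange_one.mp hi).1
  rw [filter_lt_pyRange i 0 NQ (by omega), pvCombs_one, List.map_map]
  rfl

-- degree 3: A's triple filtered loop is pvCombs 0 NQ 3
theorem deg3_eq (NQ : Int) :
    (PySem.List.pyRange 0 NQ 1).foldl (fun g i =>
      (PySem.List.pyRange 0 NQ 1).foldl (fun g j =>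
        (PySem.List.pyRange 0 NQ 1).foldl (fun g k =>
          if i < j ∧ j < k then g ++ [[i, j, k]] else g) g) g) ([] : List (List Int))
    = pvCombs 0 NQ 3 := by
  have step1 : ∀ (i j : Int) (g : List (List Int)),
      (PySem.List.pyRange 0 NQ 1).foldl (fun g k => if i < j ∧ j < k then g ++ [[i, j, k]] else g) g
        = g ++ ((PySem.List.pyRange 0 NQ 1).filter (fun k => decide (i < j ∧ j < k))).map (fun k => [i, j, k]) := by
    intro i j g
    exact PySem.List.foldl_append_ite _ _ _ _
  simp only [step1]
  have step2 : ∀ (i : Int) (g : List (List Int)),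
      (PySem.List.pyRange 0 NQ 1).foldl (fun g j =>
          g ++ ((PySem.List.pyRange 0 NQ 1).filter (fun k => decide (i < j ∧ j < k))).map (fun k => [i, j, k])) g
        = g ++ (PySem.List.pyRange 0 NQ 1).flatMap (fun j =>
            ((PySem.List.pyRange 0 NQ 1).filter (fun k => decide (i < j ∧ j < k))).map (fun k => [i, j, k])) := by
    intro i g
    exact PySem.List.foldl_append_eq_flatMap _ _ _
  simp only [step2]
  rw [PySem.List.foldl_append_eq_flatMap, List.nil_append, pvCombs_succ]
  apply List.flatMap_congr
  intro i hi
  have h0i : (0 : Int) ≤ i := (PySem.List.mem_pyRange_one.mp hi).1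
  -- inner filtered map is empty unless i < j
  have inner : ∀ j : Int,
      ((PySem.List.pyRange 0 NQ 1).filter (fun k => decide (i < j ∧ j < k))).map (fun k => [i, j, k])
        = if i < j then ((PySem.List.pyRange 0 NQ 1).filter (fun k => decide (j < k))).map (fun k => [i, j, k]) else [] := by
    intro j
    by_cases hij : i < j
    · simp [hij]
    · simp [hij]
  simp only [inner]
  rw [flatMap_ite_nil, filter_lt_pyRange i 0 NQ (by omega), pvCombs_succ, List.map_flatMap]
  apply List.flatMap_congr
  intro j hj
  have h0j : (0 : Int) ≤ j := by
    have := (PySem.List.mem_pyRange_one.mp hj).1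
    omega
  rw [filter_lt_pyRange j 0 NQ (by omega), pvCombs_one, List.map_map, List.map_map]
  rfl

-- ===== VERDICT (by name: the statement is the Claim_ definition above) =====
theorem fully_connected_spec : Claim_equal_fully_connected := by
  intro NQ degree _
  unfold Spec_fully_connected fully_connected fully_connected_alt
  by_cases h2 : degree = 2
  · subst h2
    simpa using deg2_eq NQ
  · by_cases h3 : degree = 3
    · subst h3
      simpa using deg3_eq NQ
    · simp [h2, h3]
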